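-- pv_equiv track=rewrite | github.com/JohnathanTaylor/Studio-filter | tweet.py | filter_brands
-- ===== SOURCE A (Python) =====
-- def filter_brands(text):
--     studios = ["StudioBones", "Madhouse", "@WIT_STUDIO", "Witstudio", "Studioghibli",
--         "sunrisestudio", "studiomappa", "MAPPA"]
--
--     for studio in studios:
--         if (studio in text):
--             text = text.replace(studio, "<mark>{}</mark>".format(studio))
--         else:
--             continue
--
--     return text
-- ===== SOURCE B (Python) =====
-- def filter_brands(text):
--     studios = ["StudioBones", "Madhouse", "@WIT_STUDIO", "Witstudio", "Studioghibli",
--         "sunrisestudio", "studiomappa", "MAPPA"]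
--
--     out = []
--     i = 0
--     n = len(text)
--     while i < n:
--         for studio in studios:
--             if text.startswith(studio, i):
--                 out.append("<mark>{}</mark>".format(studio))
--                 i += len(studio)
--                 break
--         else:
--             out.append(text[i])
--             i += 1
--     return "".join(out)
-- ===== Notes on version B (the rewrite author's own statement) =====
-- stated objective: alternative
-- what changed: Replaces the eight sequential full-text replace() passes (each rebuilding the string) with one single left-to-right scan that at each position tries the studio names in order, emits the marked name and jumps past it on a match, and otherwise copies the character; correctness relies on no studio name being a prefix/substring of another and replacements never creating new matches.
import Mathlib
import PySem

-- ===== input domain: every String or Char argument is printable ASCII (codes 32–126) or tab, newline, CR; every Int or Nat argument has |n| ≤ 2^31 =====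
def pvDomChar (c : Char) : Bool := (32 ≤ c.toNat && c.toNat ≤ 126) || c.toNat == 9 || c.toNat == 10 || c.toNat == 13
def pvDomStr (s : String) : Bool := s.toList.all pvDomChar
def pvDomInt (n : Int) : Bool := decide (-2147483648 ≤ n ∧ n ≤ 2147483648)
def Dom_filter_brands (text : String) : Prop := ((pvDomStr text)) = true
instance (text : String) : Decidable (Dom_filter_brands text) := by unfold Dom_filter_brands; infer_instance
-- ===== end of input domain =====

-- B replaces A's eight sequential replace() passes by ONE left-to-right scan that tries the
-- studio names in order at each position (objective: alternative single-pass algorithm).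

-- ===== PORT A =====
-- the local constant list of studio names
def pvStudios : List String :=
  ["StudioBones", "Madhouse", "@WIT_STUDIO", "Witstudio", "Studioghibli",
    "sunrisestudio", "studiomappa", "MAPPA"]

-- for studio in studios: if studio in text: text = text.replace(studio, "<mark>{}</mark>".format(studio))
def filter_brands (text : String) : String :=
  pvStudios.foldl
    (fun t studio =>
      if PySem.Str.isIn studio t then
        PySem.Str.replace t studio ("<mark>" ++ studio ++ "</mark>")
      else t)
    text

-- ===== PORT B =====
def pvStudiosC : List (List Char) := pvStudios.map String.toList

def pvMark (s : List Char) : List Char := "<mark>".toList ++ s ++ "</mark>".toList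

-- the while-loop of Source B, on List Char (ported by hand, exact): at each position try the
-- studios in order (text.startswith(studio, i) is isPrefixOf on the remaining suffix); on a
-- match emit the marked name and skip len(studio) characters, else copy one character.
-- (every studio is nonempty, so skipping len(studio) chars of c :: t is `t.drop (len - 1)`.)
def pvScan : List Char → List Char
  | [] => []
  | c :: t =>
    match pvStudiosC.find? (fun s => s.isPrefixOf (c :: t)) with
    | some s => pvMark s ++ pvScan (t.drop (s.length - 1))
    | none => c :: pvScan t
termination_by l => l.length
decreasing_by
  all_goals (simp; try omega)

def filter_brands_alt (text : String) : String := String.ofList (pvScan text.toList)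

-- ===== PRECONDITION & SPEC =====
def Spec_filter_brands (text : String) (out : String) : Prop := out = filter_brands_alt text
instance (text : String) (out : String) : Decidable (Spec_filter_brands text out) := by unfold Spec_filter_brands; infer_instance

-- ===== CLAIM (what is proved, stated in full; the proofs are below) =====
def Claim_equal_filter_brands : Prop := ∀ (text : String), Dom_filter_brands text → Spec_filter_brands text (filter_brands text)

-- ===== LEMMAS AND PROOFS =====

-- the char-level body of one pass of A's loop (pvStepG with A's `in` guard, pvStep without)
abbrev pvStepG (u s : List Char) : List Char :=
  if PySem.Chars.isIn s u then PySem.Chars.replace u s (pvMark s) else u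

abbrev pvStep (u s : List Char) : List Char := PySem.Chars.replace u s (pvMark s)

-- "no occurrence of `old` starts inside `p`" (not even one running past p's end)
abbrev pvCok (old p : List Char) : Prop :=
  ∀ j, j < p.length → ¬ old <+: p.drop j ∧ ¬ p.drop j <+: old

-- fuel-irrelevance of PySem.Chars.replace.go
theorem pv_go_spec (old new : List Char) (h : old ≠ []) :
    ∀ (fuel : Nat) (l acc : List Char), l.length ≤ fuel →
      PySem.Chars.replace.go old new fuel l acc =
        acc.reverse ++ PySem.Chars.replace.go old new l.length l [] := by
  intro fuel
  induction fuel using Nat.strong_induction_on with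
  | _ fuel ih =>
  intro l acc hl
  cases fuel with
  | zero =>
    have hnil : l = [] := by
      cases l with
      | nil => rfl
      | cons a b => simp at hl
    subst hnil
    simp [PySem.Chars.replace.go]
  | succ n =>
    cases l with
    | nil => simp [PySem.Chars.replace.go]
    | cons c t =>
      have hlen : 1 ≤ old.length := by
        cases old with
        | nil => exact absurd rfl h
        | cons a b => simp
      have hl' : t.length + 1 ≤ n + 1 := by simpa using hl
      by_cases hp : old.isPrefixOf (c :: t)
      · have e1 : PySem.Chars.replace.go old new (n + 1) (c :: t) acc
            = PySem.Chars.replace.go old new n ((c :: t).drop old.length) (new.reverse ++ acc) := by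
          simp [PySem.Chars.replace.go, hp]
        have e2 : PySem.Chars.replace.go old new (t.length + 1) (c :: t) []
            = PySem.Chars.replace.go old new t.length ((c :: t).drop old.length) (new.reverse ++ []) := by
          simp [PySem.Chars.replace.go, hp]
        have hd : ((c :: t).drop old.length).length ≤ t.length := by
          simp [List.length_drop]; omega
        rw [e1, ih n (Nat.lt_succ_self n) ((c :: t).drop old.length) (new.reverse ++ acc)
              (le_trans hd (by omega)),
            show (c :: t).length = t.length + 1 from by simp, e2,
            ih t.length (by omega) ((c :: t).drop old.length) (new.reverse ++ []) hd]
        simp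
      · have e1 : PySem.Chars.replace.go old new (n + 1) (c :: t) acc
            = PySem.Chars.replace.go old new n t (c :: acc) := by
          simp [PySem.Chars.replace.go, hp]
        have e2 : PySem.Chars.replace.go old new (t.length + 1) (c :: t) []
            = PySem.Chars.replace.go old new t.length t (c :: []) := by
          simp [PySem.Chars.replace.go, hp]
        rw [e1, ih n (Nat.lt_succ_self n) t (c :: acc) (by omega),
            show (c :: t).length = t.length + 1 from by simp, e2,
            ih t.length (by omega) t (c :: []) (le_refl _)]
        simp

theorem pv_replace_nil (old new : List Char) (h : old ≠ []) :
    PySem.Chars.replace [] old new = [] := by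
  simp [PySem.Chars.replace, PySem.Chars.replace.go, h]

theorem pv_replace_cons_not_prefix (old new : List Char) (c : Char) (t : List Char)
    (h : ¬ old <+: (c :: t)) :
    PySem.Chars.replace (c :: t) old new = c :: PySem.Chars.replace t old new := by
  have hne : old ≠ [] := by rintro rfl; exact h List.nil_prefix
  have hp : old.isPrefixOf (c :: t) = false := by
    rw [Bool.eq_false_iff]
    intro hcon
    exact h (List.isPrefixOf_iff_prefix.mp hcon)
  have hE : old.isEmpty = false := by simp [hne]
  simp only [PySem.Chars.replace, hE, Bool.false_eq_true, if_false]
  have e : PySem.Chars.replace.go old new (t.length + 1) (c :: t) []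
      = PySem.Chars.replace.go old new t.length t (c :: []) := by
    simp [PySem.Chars.replace.go, hp]
  rw [show (c :: t).length = t.length + 1 from by simp, e,
      pv_go_spec old new hne t.length t (c :: []) (le_refl _)]
  simp

theorem pv_replace_prefix (old new l : List Char) (hne : old ≠ []) (h : old <+: l) :
    PySem.Chars.replace l old new = new ++ PySem.Chars.replace (l.drop old.length) old new := by
  cases l with
  | nil => exact absurd (List.prefix_nil.mp h) hne
  | cons c t =>
    have hlen : 1 ≤ old.length := by
      cases old with
      | nil => exact absurd rfl hne
      | cons a b => simp
    have hp : old.isPrefixOf (c :: t) = true := List.isPrefixOf_iff_prefix.mpr h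
    have hE : old.isEmpty = false := by simp [hne]
    simp only [PySem.Chars.replace, hE, Bool.false_eq_true, if_false]
    have hd : ((c :: t).drop old.length).length ≤ t.length := by
      simp [List.length_drop]; omega
    have e : PySem.Chars.replace.go old new (t.length + 1) (c :: t) []
        = PySem.Chars.replace.go old new t.length ((c :: t).drop old.length) (new.reverse ++ []) := by
      simp [PySem.Chars.replace.go, hp]
    rw [show (c :: t).length = t.length + 1 from by simp, e,
        pv_go_spec old new hne t.length _ _ hd]
    simp

theorem pv_replace_not_infix (old new t : List Char) (hne : old ≠ []) (h : ¬ old <:+: t) :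
    PySem.Chars.replace t old new = t := by
  induction t with
  | nil => exact pv_replace_nil old new hne
  | cons c t ih =>
    have hp : ¬ old <+: (c :: t) := fun hp => h hp.isInfix
    rw [pv_replace_cons_not_prefix old new c t hp,
        ih (fun hi => h (hi.trans (List.suffix_cons c t).isInfix))]

-- any '<'-free prefix of a replaced string (replacement starting with '<') was already a prefix
theorem pv_prefix_replace (old m : List Char) (hne : old ≠ []) :
    ∀ (t u : List Char), '<' ∉ u → u <+: PySem.Chars.replace t old ('<' :: m) → u <+: t := by
  intro t
  induction t with
  | nil => intro u hu hpre; rwa [pv_replace_nil old _ hne] at hpre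
  | cons c t ih =>
    intro u hu hpre
    by_cases hp : old <+: (c :: t)
    · rw [pv_replace_prefix old _ (c :: t) hne hp, List.cons_append] at hpre
      cases u with
      | nil => exact List.nil_prefix
      | cons x u' =>
        have hx : x = '<' := (List.cons_prefix_cons.mp hpre).1
        subst hx
        exact absurd (List.mem_cons_self) hu
    · rw [pv_replace_cons_not_prefix old _ c t hp] at hpre
      cases u with
      | nil => exact List.nil_prefix
      | cons x u' =>
        obtain ⟨hx, hu'⟩ := List.cons_prefix_cons.mp hpre
        subst hx
        exact List.cons_prefix_cons.mpr
          ⟨rfl, ih u' (fun hm => hu (List.mem_cons_of_mem _ hm)) hu'⟩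

theorem pv_cok_tail (old : List Char) (c : Char) (p : List Char)
    (h : pvCok old (c :: p)) : pvCok old p := by
  intro j hj
  have := h (j + 1) (by simpa using Nat.succ_lt_succ hj)
  simpa using this

theorem pv_commute (old new : List Char) (_hne : old ≠ []) :
    ∀ p, pvCok old p → ∀ u,
      PySem.Chars.replace (p ++ u) old new = p ++ PySem.Chars.replace u old new := by
  intro p
  induction p with
  | nil => intro _ u; simp
  | cons a p' ih =>
    intro hc u
    have h0 : ¬ old <+: (a :: p') ∧ ¬ (a :: p') <+: old := by simpa using hc 0 (by simp)
    have hnp : ¬ old <+: ((a :: p') ++ u) := by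
      intro hcon
      rcases Nat.le_total old.length (a :: p').length with hle | hle
      · exact h0.1 (List.prefix_of_prefix_length_le hcon (List.prefix_append _ _) hle)
      · exact h0.2 (List.prefix_of_prefix_length_le (List.prefix_append _ _) hcon hle)
    rw [List.cons_append,
        pv_replace_cons_not_prefix old new a (p' ++ u) (by rwa [List.cons_append] at hnp),
        ih (pv_cok_tail old a p' hc) u]
    simp

-- mark starts with '<'
theorem pv_mark_cons (s : List Char) :
    pvMark s = '<' :: ("mark>".toList ++ s ++ "</mark>".toList) := by
  have h1 : ("<mark>" : String).toList = '<' :: ("mark>" : String).toList := by decide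
  simp [pvMark, h1]

theorem pv_foldl_commute : ∀ (M : List (List Char)), (∀ s ∈ M, s ≠ []) →
    ∀ (p : List Char), (∀ s ∈ M, pvCok s p) → ∀ u,
      M.foldl pvStep (p ++ u) = p ++ M.foldl pvStep u := by
  intro M
  induction M with
  | nil => intro _ p _ u; simp
  | cons s1 M' ih =>
    intro hne p hc u
    simp only [List.foldl_cons]
    rw [show pvStep (p ++ u) s1 = p ++ pvStep u s1 from
          pv_commute s1 (pvMark s1) (hne s1 (by simp)) p (hc s1 (by simp)) u]
    exact ih (fun s hs => hne s (by simp [hs])) p (fun s hs => hc s (by simp [hs])) (pvStep u s1)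

theorem pv_foldl_nil : ∀ (M : List (List Char)), (∀ s ∈ M, s ≠ []) →
    M.foldl pvStep [] = [] := by
  intro M
  induction M with
  | nil => intro _; rfl
  | cons s1 M' ih =>
    intro hne
    simp only [List.foldl_cons]
    rw [show pvStep [] s1 = [] from pv_replace_nil s1 (pvMark s1) (hne s1 (by simp))]
    exact ih (fun s hs => hne s (by simp [hs]))

theorem pv_find_congr {α : Type} (l : List α) (p q : α → Bool)
    (h : ∀ a ∈ l, p a = q a) : l.find? p = l.find? q := by
  induction l with
  | nil => rfl
  | cons a l ih =>
    have ha := h a (by simp)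
    cases hq : q a with
    | true => rw [List.find?_cons_of_pos (ha ▸ hq), List.find?_cons_of_pos hq]
    | false =>
      rw [List.find?_cons_of_neg (by simp [ha, hq]), List.find?_cons_of_neg (by simp [hq])]
      exact ih (fun a ha' => h a (by simp [ha']))

-- the structural condition the studio list satisfies
abbrev pvGood (M : List (List Char)) : Prop :=
  (∀ s ∈ M, s ≠ [] ∧ '<' ∉ s) ∧ M.Pairwise pvCok ∧ M.Pairwise (fun a b => pvCok b (pvMark a))

-- one scan step of the composite of all the passes
theorem pv_step_lemma : ∀ (M : List (List Char)), pvGood M → ∀ (c : Char) (t : List Char),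
    M.foldl pvStep (c :: t) =
      match M.find? (fun s => s.isPrefixOf (c :: t)) with
      | some s => pvMark s ++ M.foldl pvStep ((c :: t).drop s.length)
      | none => c :: M.foldl pvStep t := by
  intro M
  induction M with
  | nil => intro _ c t; simp
  | cons s1 M' ih =>
    intro hg c t
    obtain ⟨hall, hpair, hmark⟩ := hg
    have hs1ne : s1 ≠ [] := (hall s1 (by simp)).1
    by_cases h1 : s1 <+: (c :: t)
    · have hf : (s1 :: M').find? (fun s => s.isPrefixOf (c :: t)) = some s1 := by
        apply List.find?_cons_of_pos
        simpa using List.isPrefixOf_iff_prefix.mpr h1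
      rw [hf]
      obtain ⟨rest, hrest⟩ := h1
      have hdrop : (c :: t).drop s1.length = rest := by rw [← hrest]; simp
      simp only [List.foldl_cons]
      have e1 : pvStep (c :: t) s1 = pvMark s1 ++ PySem.Chars.replace rest s1 (pvMark s1) := by
        show PySem.Chars.replace (c :: t) s1 (pvMark s1) = _
        rw [← hrest, pv_replace_prefix s1 (pvMark s1) _ hs1ne (List.prefix_append _ _),
            List.drop_left]
      rw [e1,
          pv_foldl_commute M' (fun s hs => (hall s (by simp [hs])).1) (pvMark s1)
            (fun s hs => (List.pairwise_cons.mp hmark).1 s hs)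
            (PySem.Chars.replace rest s1 (pvMark s1)),
          hdrop]
    · have hf : (s1 :: M').find? (fun s => s.isPrefixOf (c :: t))
          = M'.find? (fun s => s.isPrefixOf (c :: t)) := by
        refine List.find?_cons_of_neg ?_
        exact fun hcon => h1 (List.isPrefixOf_iff_prefix.mp hcon)
      rw [hf]
      simp only [List.foldl_cons]
      have e2 : pvStep (c :: t) s1 = c :: PySem.Chars.replace t s1 (pvMark s1) :=
        pv_replace_cons_not_prefix s1 (pvMark s1) c t h1
      rw [e2]
      have hg' : pvGood M' :=
        ⟨fun s hs => hall s (by simp [hs]), (List.pairwise_cons.mp hpair).2,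
          (List.pairwise_cons.mp hmark).2⟩
      rw [ih hg' c (PySem.Chars.replace t s1 (pvMark s1))]
      have hiff : ∀ q ∈ M',
          (q.isPrefixOf (c :: PySem.Chars.replace t s1 (pvMark s1)))
            = (q.isPrefixOf (c :: t)) := by
        intro q hq
        have hqlt : '<' ∉ q := (hall q (by simp [hq])).2
        have hcok : pvCok s1 q := (List.pairwise_cons.mp hpair).1 q hq
        cases hb : (q.isPrefixOf (c :: t)) with
        | true =>
          have hpre : q <+: (c :: t) := List.isPrefixOf_iff_prefix.mp hb
          refine List.isPrefixOf_iff_prefix.mpr ?_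
          cases q with
          | nil => exact List.nil_prefix
          | cons x q' =>
            obtain ⟨hx, hq'⟩ := List.cons_prefix_cons.mp hpre
            subst hx
            obtain ⟨u, hu⟩ := hq'
            have hcok' : pvCok s1 q' := pv_cok_tail s1 _ q' hcok
            rw [← hu, pv_commute s1 (pvMark s1) hs1ne q' hcok' u]
            exact List.cons_prefix_cons.mpr ⟨rfl, List.prefix_append _ _⟩
        | false =>
          rw [Bool.eq_false_iff]
          intro hcon
          have hpre : q <+: (c :: PySem.Chars.replace t s1 (pvMark s1)) :=
            List.isPrefixOf_iff_prefix.mp hcon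
          have : q <+: (c :: t) := by
            cases q with
            | nil => exact List.nil_prefix
            | cons x q' =>
              obtain ⟨hx, hq'⟩ := List.cons_prefix_cons.mp hpre
              subst hx
              rw [pv_mark_cons s1] at hq'
              exact List.cons_prefix_cons.mpr
                ⟨rfl, pv_prefix_replace s1 _ hs1ne t q'
                  (fun hm => hqlt (by simp [hm])) hq'⟩
          rw [Bool.eq_false_iff] at hb
          exact hb (List.isPrefixOf_iff_prefix.mpr this)
      rw [pv_find_congr M' _ _ hiff]
      cases hfq : M'.find? (fun s => s.isPrefixOf (c :: t)) with
      | none => rfl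
      | some q =>
        have hqmem : q ∈ M' := List.mem_of_find?_eq_some hfq
        have hqpre : q <+: (c :: t) := by
          have hb := List.find?_some hfq
          simp only [List.isPrefixOf_iff_prefix] at hb
          exact hb
        have hqne : q ≠ [] := (hall q (by simp [hqmem])).1
        cases q with
        | nil => exact absurd rfl hqne
        | cons x q' =>
          obtain ⟨hx, hq'⟩ := List.cons_prefix_cons.mp hqpre
          subst hx
          obtain ⟨u, hu⟩ := hq'
          have hcok' : pvCok s1 q' :=
            pv_cok_tail s1 _ q' ((List.pairwise_cons.mp hpair).1 _ hqmem)
          have d1 : (x :: PySem.Chars.replace t s1 (pvMark s1)).drop (x :: q').length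
              = PySem.Chars.replace u s1 (pvMark s1) := by
            rw [← hu, pv_commute s1 (pvMark s1) hs1ne q' hcok' u]
            simp
          have d2 : (x :: t).drop (x :: q').length = u := by
            rw [← hu]; simp
          have hL : (match (some (x :: q') : Option (List Char)) with
              | some s => pvMark s ++
                  List.foldl pvStep (List.drop s.length (x :: PySem.Chars.replace t s1 (pvMark s1))) M'
              | none => x :: List.foldl pvStep (PySem.Chars.replace t s1 (pvMark s1)) M')
              = pvMark (x :: q') ++
                  List.foldl pvStep
                    (List.drop (x :: q').length (x :: PySem.Chars.replace t s1 (pvMark s1))) M' := rfl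
          have hR : (match (some (x :: q') : Option (List Char)) with
              | some s => pvMark s ++ List.foldl pvStep (pvStep (List.drop s.length (x :: t)) s1) M'
              | none => x :: List.foldl pvStep (pvStep t s1) M')
              = pvMark (x :: q') ++
                  List.foldl pvStep (pvStep (List.drop (x :: q').length (x :: t)) s1) M' := rfl
          rw [hL, hR, d1, d2]

theorem pv_good_studios : pvGood pvStudiosC := by decide

theorem pv_main (t : List Char) : pvStudiosC.foldl pvStep t = pvScan t := by
  have hg := pv_good_studios
  suffices H : ∀ (n : Nat) (t : List Char), t.length ≤ n →
      pvStudiosC.foldl pvStep t = pvScan t from H t.length t (le_refl _)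
  intro n
  induction n with
  | zero =>
    intro t ht
    have hnil : t = [] := by
      cases t with
      | nil => rfl
      | cons a b => simp at ht
    subst hnil
    rw [pv_foldl_nil pvStudiosC (fun s hs => (hg.1 s hs).1), pvScan.eq_def]
  | succ n ih =>
    intro t ht
    cases t with
    | nil =>
      rw [pv_foldl_nil pvStudiosC (fun s hs => (hg.1 s hs).1), pvScan.eq_def]
    | cons c t' =>
      have ht' : t'.length ≤ n := by simp at ht; omega
      rw [pv_step_lemma pvStudiosC hg c t']
      cases hf : pvStudiosC.find? (fun s => s.isPrefixOf (c :: t')) with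
      | none =>
        rw [ih t' ht']
        conv_rhs => rw [pvScan.eq_def]
        simp [hf]
      | some q =>
        have hqne : q ≠ [] := (hg.1 q (List.mem_of_find?_eq_some hf)).1
        have hdrop : (c :: t').drop q.length = t'.drop (q.length - 1) := by
          cases q with
          | nil => exact absurd rfl hqne
          | cons a q'' => simp
        have hlen' : (t'.drop (q.length - 1)).length ≤ n := by
          simp [List.length_drop]; omega
        have hred : (match (some q : Option (List Char)) with
            | some s => pvMark s ++ List.foldl pvStep (List.drop s.length (c :: t')) pvStudiosC
            | none => c :: List.foldl pvStep t' pvStudiosC)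
            = pvMark q ++ List.foldl pvStep (List.drop q.length (c :: t')) pvStudiosC := rfl
        rw [hred, hdrop, ih (t'.drop (q.length - 1)) hlen']
        conv_rhs => rw [pvScan.eq_def]
        simp [hf]

theorem pv_guard : ∀ (M : List (List Char)), (∀ s ∈ M, s ≠ []) → ∀ (t : List Char),
    M.foldl pvStepG t = M.foldl pvStep t := by
  intro M
  induction M with
  | nil => intro _ t; rfl
  | cons s1 M' ih =>
    intro hne t
    simp only [List.foldl_cons]
    have hstep : pvStepG t s1 = pvStep t s1 := by
      by_cases h : PySem.Chars.isIn s1 t = true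
      · simp [h]
      · have hninf : ¬ s1 <:+: t := by
          rw [← PySem.Chars.isIn_iff_infix]
          exact h
        rw [show pvStepG t s1 = t from by simp [h],
            show pvStep t s1 = PySem.Chars.replace t s1 (pvMark s1) from rfl,
            pv_replace_not_infix s1 (pvMark s1) t (hne s1 (by simp)) hninf]
    rw [hstep]
    exact ih (fun s hs => hne s (by simp [hs])) (pvStep t s1)

theorem pv_bridgeA : ∀ (M : List String) (t : String),
    (M.foldl
        (fun t s =>
          if PySem.Str.isIn s t then PySem.Str.replace t s ("<mark>" ++ s ++ "</mark>") else t)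
        t).toList
      = (M.map String.toList).foldl pvStepG t.toList := by
  intro M
  induction M with
  | nil => intro t; rfl
  | cons s M' ih =>
    intro t
    simp only [List.foldl_cons, List.map_cons]
    rw [ih]
    congr 1
    by_cases h : PySem.Str.isIn s t = true
    · have h' : PySem.Chars.isIn s.toList t.toList = true := h
      simp only [pvStepG, h, h', if_true]
      rw [PySem.Str.toList_replace]
      congr 1
      simp [pvMark]
    · have h' : PySem.Chars.isIn s.toList t.toList = false := by
        rw [Bool.eq_false_iff]; exact h
      simp [pvStepG, h']

-- ===== VERDICT (by name: the statement is the Claim_ definition above) =====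
theorem filter_brands_spec : Claim_equal_filter_brands := by
  intro text _
  unfold Spec_filter_brands
  have h : (filter_brands text).toList = (filter_brands_alt text).toList := by
    have hb := pv_bridgeA pvStudios text
    rw [show (pvStudios.map String.toList) = pvStudiosC from rfl] at hb
    rw [filter_brands, hb,
        pv_guard pvStudiosC (fun s hs => (pv_good_studios.1 s hs).1) text.toList,
        pv_main text.toList]
    simp [filter_brands_alt]
  calc filter_brands text = String.ofList (filter_brands text).toList := by
        rw [String.ofList_toList]
    _ = String.ofList (filter_brands_alt text).toList := by rw [h]
    _ = filter_brands_alt text := by rw [String.ofList_toList]
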